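-- pv_equiv track=rewrite | github.com/Zoher15/PluRule | scripts/6_build_trees_and_threads.py | calculate_depth_levels
-- ===== SOURCE A (Python) =====
-- from collections import deque, defaultdict
-- from typing import Dict, List, Any, Optional, Tuple
--
-- def calculate_depth_levels(root_comments: List[str], children_map: Dict[str, List[str]]) -> Dict[int, List[str]]:
--     """Calculate depth levels for comments using BFS."""
--     depth_levels = {}
--
--     if not root_comments:
--         return depth_levels
--
--     # Initialize depth 0 with root comments
--     depth_levels[0] = root_comments[:]
--     comment_depths = {comment_id: 0 for comment_id in root_comments}
--
--     # BFS to assign depths using deque for O(1) popleft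
--     queue = deque((comment_id, 0) for comment_id in root_comments)
--
--     while queue:
--         current_comment, current_depth = queue.popleft()
--
--         # Get children of current comment
--         child_ids = children_map.get(current_comment, [])
--
--         if child_ids:
--             next_depth = current_depth + 1
--
--             # Initialize depth level if not exists
--             if next_depth not in depth_levels:
--                 depth_levels[next_depth] = []
--
--             # Add children to next depth level
--             for child_id in child_ids:
--                 if child_id not in comment_depths:  # Avoid cycles
--                     depth_levels[next_depth].append(child_id)
--                     comment_depths[child_id] = next_depth
--                     queue.append((child_id, next_depth))
--
--     return depth_levels
-- ===== SOURCE B (Python) =====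
-- from typing import Dict, List
--
--
-- def calculate_depth_levels(root_comments: List[str], children_map: Dict[str, List[str]]) -> Dict[int, List[str]]:
--     """Calculate depth levels for comments using level-synchronous BFS.
--
--     Instead of a (node, depth) queue, we advance one whole level at a time.
--     A level entry for depth+1 is created exactly when some node on the current
--     frontier has a (nonempty) children entry, matching A's output exactly
--     (including a possibly-empty deepest level when all such children were
--     already visited).
--     """
--     if not root_comments:
--         return {}
--
--     depth_levels = {0: root_comments[:]}
--     visited = {comment_id: 0 for comment_id in root_comments}
--     frontier = root_comments[:]
--     depth = 0
--
--     while frontier: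
--         next_frontier = []
--         has_children = False
--         for node in frontier:
--             kids = children_map.get(node, [])
--             if kids:
--                 has_children = True
--                 for kid in kids:
--                     if kid not in visited:
--                         visited[kid] = depth + 1
--                         next_frontier.append(kid)
--         depth += 1
--         if has_children:
--             depth_levels[depth] = next_frontier
--         frontier = next_frontier
--
--     return depth_levels
-- ===== Notes on version B (the rewrite author's own statement) =====
-- stated objective: alternative
-- what changed: Replaces the per-node (node, depth) deque BFS with a level-synchronous BFS: one whole frontier list is scanned per round and each depth's list is built and stored as a level, so no (node, depth) queue is maintained.
import Mathlib
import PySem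

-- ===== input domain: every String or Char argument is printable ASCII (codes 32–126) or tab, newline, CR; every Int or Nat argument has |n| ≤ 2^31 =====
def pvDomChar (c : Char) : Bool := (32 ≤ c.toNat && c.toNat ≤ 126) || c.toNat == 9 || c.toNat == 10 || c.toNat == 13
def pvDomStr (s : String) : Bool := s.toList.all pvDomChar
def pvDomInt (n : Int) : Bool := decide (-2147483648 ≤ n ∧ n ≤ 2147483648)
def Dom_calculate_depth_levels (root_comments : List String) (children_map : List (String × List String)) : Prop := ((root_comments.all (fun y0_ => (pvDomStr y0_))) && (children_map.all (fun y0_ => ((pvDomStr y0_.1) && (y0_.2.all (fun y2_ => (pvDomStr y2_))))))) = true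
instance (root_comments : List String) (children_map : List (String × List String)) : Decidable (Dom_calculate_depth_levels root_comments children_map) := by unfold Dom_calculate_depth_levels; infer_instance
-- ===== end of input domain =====

-- B changes the decomposition: a level-synchronous BFS (whole-frontier rounds) instead of A's per-node (node, depth) deque; same output, same asymptotic cost.

-- Termination measure shared by both loops: twice the number of distinct potential children
-- not yet recorded in the visited dict, plus the queue/frontier length.
def pvUnseen (cm : List (String × List String)) (cd : PySem.Dict String Int) : Nat :=
  (((cm.flatMap (fun p => p.2)).dedup).filter (fun x => PySem.Dict.contains cd x = false)).length

lemma pvUnseen_insert_lt (cm : List (String × List String)) (cd : PySem.Dict String Int)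
    {c : String} (hm : c ∈ cm.flatMap (fun p => p.2))
    (hc : PySem.Dict.contains cd c = false) (v : Int) :
    pvUnseen cm (PySem.Dict.insert cd c v) < pvUnseen cm cd := by
  unfold pvUnseen
  have hcl : c ∈ (cm.flatMap (fun p => p.2)).dedup := List.mem_dedup.mpr hm
  have himp : ∀ a, (decide (PySem.Dict.contains (PySem.Dict.insert cd c v) a = false)) = true →
      (decide (PySem.Dict.contains cd a = false)) = true := by
    intro a ha
    simp only [decide_eq_true_eq, PySem.Dict.contains_insert, Bool.or_eq_false_iff] at ha ⊢
    exact ha.2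
  have hsub := List.monotone_filter_right (cm.flatMap (fun p => p.2)).dedup himp
  have hle := hsub.length_le
  rcases lt_or_eq_of_le hle with hlt | heq
  · exact hlt
  · exfalso
    have heql := hsub.eq_of_length heq
    have hmem : c ∈ (cm.flatMap (fun p => p.2)).dedup.filter
        (fun x => decide (PySem.Dict.contains cd x = false)) :=
      List.mem_filter.mpr ⟨hcl, by simp [hc]⟩
    rw [← heql] at hmem
    have := (List.mem_filter.mp hmem).2
    simp at this

-- every child delivered by children_map.get(node, []) is a potential child
lemma pvGetD_mem (cm : List (String × List String)) (node c : String)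
    (h : c ∈ PySem.Dict.getD (PySem.Dict.mk cm) node []) :
    c ∈ cm.flatMap (fun p => p.2) := by
  induction cm with
  | nil =>
    rw [PySem.Dict.getD_eq_get?_getD] at h
    simp [PySem.Dict.get?] at h
  | cons p rest ih =>
    rw [PySem.Dict.getD_eq_get?_getD, PySem.Dict.get?_mk_cons] at h
    by_cases hk : (p.1 == node) = true
    · simp only [hk, if_true, Option.getD_some] at h
      exact List.mem_flatMap.mpr ⟨p, List.mem_cons_self, h⟩
    · simp only [hk, if_false, Bool.false_eq_true] at h
      rw [← PySem.Dict.getD_eq_get?_getD] at h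
      exact List.mem_flatMap.mpr (by
        rcases List.mem_flatMap.mp (ih h) with ⟨q, hq, hcq⟩
        exact ⟨q, List.mem_cons_of_mem _ hq, hcq⟩)

-- ===== PORT A =====
-- one step of A's inner 'for child_id in child_ids' loop; state = (depth_levels, comment_depths, appended queue items)
def pvA_kidsStep (nd : Int)
    (st : PySem.Dict Int (List String) × PySem.Dict String Int × List (String × Int))
    (c : String) :
    PySem.Dict Int (List String) × PySem.Dict String Int × List (String × Int) :=
  if PySem.Dict.contains st.2.1 c then st
  else (PySem.Dict.modify st.1 nd [] (fun l => l ++ [c]),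
        PySem.Dict.insert st.2.1 c nd,
        st.2.2 ++ [(c, nd)])

lemma pvA_kids_measure (cm : List (String × List String)) (nd : Int) :
    ∀ (kids : List String), (∀ c ∈ kids, c ∈ cm.flatMap (fun p => p.2)) →
    ∀ (dl : PySem.Dict Int (List String)) (cd : PySem.Dict String Int) (app : List (String × Int)),
      2 * pvUnseen cm (kids.foldl (pvA_kidsStep nd) (dl, cd, app)).2.1
        + (kids.foldl (pvA_kidsStep nd) (dl, cd, app)).2.2.length
      ≤ 2 * pvUnseen cm cd + app.length := by
  intro kids hmem
  induction kids with
  | nil => intro dl cd app; simp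
  | cons c kids ih =>
    intro dl cd app
    simp only [List.foldl_cons, pvA_kidsStep]
    by_cases hcon : PySem.Dict.contains cd c = true
    · simp only [hcon, if_true]
      exact ih (fun x hx => hmem x (List.mem_cons_of_mem _ hx)) dl cd app
    · rw [Bool.not_eq_true] at hcon
      simp only [hcon, Bool.false_eq_true, if_false]
      have h1 := ih (fun x hx => hmem x (List.mem_cons_of_mem _ hx))
        (PySem.Dict.modify dl (nd) [] (fun l => l ++ [c]))
        (PySem.Dict.insert cd c nd) (app ++ [(c, nd)])
      have h2 := pvUnseen_insert_lt cm cd (hmem c List.mem_cons_self) hcon nd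
      simp only [List.length_append, List.length_cons, List.length_nil] at h1 ⊢
      omega

-- A's while-loop over the (comment, depth) queue
def pvA_loop (cm : List (String × List String)) (queue : List (String × Int))
    (dl : PySem.Dict Int (List String)) (cd : PySem.Dict String Int) :
    PySem.Dict Int (List String) :=
  match queue with
  | [] => dl
  | (cur, d) :: qs =>
    let child_ids := PySem.Dict.getD (PySem.Dict.mk cm) cur []
    if child_ids.isEmpty then
      pvA_loop cm qs dl cd
    else
      let nd := d + 1
      let dl1 := if PySem.Dict.contains dl nd = false then PySem.Dict.insert dl nd [] else dl
      let st := child_ids.foldl (pvA_kidsStep nd) (dl1, cd, [])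
      pvA_loop cm (qs ++ st.2.2) st.1 st.2.1
termination_by 2 * pvUnseen cm cd + queue.length
decreasing_by
  · simp only [List.length_cons]; omega
  · simp only [dite_eq_ite, List.length_append, List.length_cons]
    have h := pvA_kids_measure cm (d + 1) (PySem.Dict.getD (PySem.Dict.mk cm) cur [])
      (fun c hc => pvGetD_mem cm cur c hc)
      (if PySem.Dict.contains dl (d + 1) = false then PySem.Dict.insert dl (d + 1) [] else dl) cd []
    simp only [List.length_nil, Nat.add_zero] at h
    omega

def calculate_depth_levels (root_comments : List String) (children_map : List (String × List String)) : List (Int × List String) :=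
  if root_comments.isEmpty then []
  else
    (pvA_loop children_map
      (root_comments.map (fun c => (c, (0 : Int))))
      (PySem.Dict.insert PySem.Dict.empty 0 root_comments)
      (root_comments.foldl (fun d c => PySem.Dict.insert d c 0) PySem.Dict.empty)).items

-- ===== PORT B =====
-- one step of B's inner 'for kid in kids' loop; state = (next_frontier, has_children, visited)
def pvB_kidsStep (nd : Int)
    (st : List String × Bool × PySem.Dict String Int) (c : String) :
    List String × Bool × PySem.Dict String Int :=
  if PySem.Dict.contains st.2.2 c then st
  else (st.1 ++ [c], st.2.1, PySem.Dict.insert st.2.2 c nd)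

-- one step of B's 'for node in frontier' loop
def pvB_node (cm : List (String × List String)) (nd : Int)
    (st : List String × Bool × PySem.Dict String Int) (node : String) :
    List String × Bool × PySem.Dict String Int :=
  let kids := PySem.Dict.getD (PySem.Dict.mk cm) node []
  if kids.isEmpty then st
  else kids.foldl (pvB_kidsStep nd) (st.1, true, st.2.2)

lemma pvB_kids_measure (cm : List (String × List String)) (nd : Int) :
    ∀ (kids : List String), (∀ c ∈ kids, c ∈ cm.flatMap (fun p => p.2)) →
    ∀ (acc : List String) (h : Bool) (cd : PySem.Dict String Int),
      2 * pvUnseen cm (kids.foldl (pvB_kidsStep nd) (acc, h, cd)).2.2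
        + (kids.foldl (pvB_kidsStep nd) (acc, h, cd)).1.length
      ≤ 2 * pvUnseen cm cd + acc.length := by
  intro kids hmem
  induction kids with
  | nil => intro acc h cd; simp
  | cons c kids ih =>
    intro acc h cd
    simp only [List.foldl_cons, pvB_kidsStep]
    by_cases hcon : PySem.Dict.contains cd c = true
    · simp only [hcon, if_true]
      exact ih (fun x hx => hmem x (List.mem_cons_of_mem _ hx)) acc h cd
    · rw [Bool.not_eq_true] at hcon
      simp only [hcon, Bool.false_eq_true, if_false]
      have h1 := ih (fun x hx => hmem x (List.mem_cons_of_mem _ hx))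
        (acc ++ [c]) h (PySem.Dict.insert cd c nd)
      have h2 := pvUnseen_insert_lt cm cd (hmem c List.mem_cons_self) hcon nd
      simp only [List.length_append, List.length_cons, List.length_nil] at h1 ⊢
      omega

lemma pvB_fold_measure (cm : List (String × List String)) (nd : Int) :
    ∀ (fr : List String) (acc : List String) (h : Bool) (cd : PySem.Dict String Int),
      2 * pvUnseen cm (fr.foldl (pvB_node cm nd) (acc, h, cd)).2.2
        + (fr.foldl (pvB_node cm nd) (acc, h, cd)).1.length
      ≤ 2 * pvUnseen cm cd + acc.length := by
  intro fr
  induction fr with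
  | nil => intro acc h cd; simp
  | cons node fr ih =>
    intro acc h cd
    simp only [List.foldl_cons]
    have hnode : ∀ (acc : List String) (h : Bool) (cd : PySem.Dict String Int),
        2 * pvUnseen cm (pvB_node cm nd (acc, h, cd) node).2.2
          + (pvB_node cm nd (acc, h, cd) node).1.length
        ≤ 2 * pvUnseen cm cd + acc.length := by
      intro acc h cd
      unfold pvB_node
      by_cases hk : (PySem.Dict.getD (PySem.Dict.mk cm) node []).isEmpty
      · simp [hk]
      · simp only [hk, Bool.false_eq_true, if_false]
        exact pvB_kids_measure cm nd (PySem.Dict.getD (PySem.Dict.mk cm) node [])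
          (fun x hx => pvGetD_mem cm node x hx) acc true cd
    have h1 := hnode acc h cd
    have h2 := ih (pvB_node cm nd (acc, h, cd) node).1 (pvB_node cm nd (acc, h, cd) node).2.1
      (pvB_node cm nd (acc, h, cd) node).2.2
    calc 2 * pvUnseen cm ((fr.foldl (pvB_node cm nd) (pvB_node cm nd (acc, h, cd) node)).2.2)
          + (fr.foldl (pvB_node cm nd) (pvB_node cm nd (acc, h, cd) node)).1.length
        ≤ 2 * pvUnseen cm (pvB_node cm nd (acc, h, cd) node).2.2
          + (pvB_node cm nd (acc, h, cd) node).1.length := by simpa using h2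
      _ ≤ 2 * pvUnseen cm cd + acc.length := h1

-- B's 'while frontier' loop
def pvB_loop (cm : List (String × List String)) (frontier : List String)
    (dl : PySem.Dict Int (List String)) (cd : PySem.Dict String Int) (depth : Int) :
    PySem.Dict Int (List String) :=
  if h : frontier.isEmpty then dl
  else
    let st := frontier.foldl (pvB_node cm (depth + 1)) (([] : List String), false, cd)
    let dl1 := if st.2.1 then PySem.Dict.insert dl (depth + 1) st.1 else dl
    pvB_loop cm st.1 dl1 st.2.2 (depth + 1)
termination_by 2 * pvUnseen cm cd + frontier.length
decreasing_by
  simp only [List.foldl_subtype, List.unattach_attach]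
  have hm := pvB_fold_measure cm (depth + 1) frontier [] false cd
  simp only [List.length_nil, Nat.add_zero] at hm
  have : frontier.length ≠ 0 := by
    simpa [List.isEmpty_iff, List.length_eq_zero_iff] using h
  omega

def calculate_depth_levels_alt (root_comments : List String) (children_map : List (String × List String)) : List (Int × List String) :=
  if root_comments.isEmpty then []
  else
    (pvB_loop children_map root_comments
      (PySem.Dict.insert PySem.Dict.empty 0 root_comments)
      (root_comments.foldl (fun d c => PySem.Dict.insert d c 0) PySem.Dict.empty)
      0).items

-- ===== PRECONDITION & SPEC =====
def Spec_calculate_depth_levels (root_comments : List String) (children_map : List (String × List String)) (out : List (Int × List String)) : Prop := out = calculate_depth_levels_alt root_comments children_map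
instance (root_comments : List String) (children_map : List (String × List String)) (out : List (Int × List String)) : Decidable (Spec_calculate_depth_levels root_comments children_map out) := by unfold Spec_calculate_depth_levels; infer_instance

-- ===== CLAIM (what is proved, stated in full; the proofs are below) =====
def Claim_equal_calculate_depth_levels : Prop := ∀ (root_comments : List String) (children_map : List (String × List String)), Dom_calculate_depth_levels root_comments children_map → Spec_calculate_depth_levels root_comments children_map (calculate_depth_levels root_comments children_map)

-- ===== LEMMAS AND PROOFS =====

-- A's inner children loop and B's inner children loop walk in lock-step: starting from visited
-- dict cd and partial next-level acc (A holds it as the value of key nd, B as a plain list),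
-- both append the same fresh children 'new' and end with the same visited dict.
lemma pvKids_corr (nd : Int) (base : PySem.Dict Int (List String)) :
    ∀ (kids : List String) (acc : List String) (hb : Bool) (cd : PySem.Dict String Int)
      (app : List (String × Int)),
    ∃ new cd',
      kids.foldl (pvB_kidsStep nd) (acc, hb, cd) = (acc ++ new, hb, cd') ∧
      kids.foldl (pvA_kidsStep nd) (PySem.Dict.insert base nd acc, cd, app)
        = (PySem.Dict.insert base nd (acc ++ new), cd', app ++ new.map (fun c => (c, nd))) := by
  intro kids
  induction kids with
  | nil => intro acc hb cd app; exact ⟨[], cd, by simp, by simp⟩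
  | cons c kids ih =>
    intro acc hb cd app
    simp only [List.foldl_cons, pvA_kidsStep, pvB_kidsStep]
    by_cases hcon : PySem.Dict.contains cd c = true
    · simp only [hcon, if_true]
      exact ih acc hb cd app
    · rw [Bool.not_eq_true] at hcon
      simp only [hcon, Bool.false_eq_true, if_false]
      have hmod : PySem.Dict.modify (PySem.Dict.insert base nd acc) nd [] (fun l => l ++ [c])
          = PySem.Dict.insert base nd (acc ++ [c]) := by
        show PySem.Dict.insert (PySem.Dict.insert base nd acc) nd
            ((PySem.Dict.getD (PySem.Dict.insert base nd acc) nd []) ++ [c])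
          = PySem.Dict.insert base nd (acc ++ [c])
        rw [PySem.Dict.getD_insert_self, PySem.Dict.insert_insert_self]
      rw [hmod]
      obtain ⟨new, cd', hB, hA⟩ := ih (acc ++ [c]) hb (PySem.Dict.insert cd c nd) (app ++ [(c, nd)])
      refine ⟨c :: new, cd', ?_, ?_⟩
      · rw [hB]; simp
      · rw [hA]; simp

-- mid-level correspondence: A's queue holds the unprocessed rest of the current level at depth d
-- followed by the partial next level at depth d+1; processing the rest equals B's frontier fold.
lemma pvInner (cm : List (String × List String)) (d : Int) (base : PySem.Dict Int (List String))
    (hb : PySem.Dict.contains base (d + 1) = false) :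
    ∀ (rest acc : List String) (has : Bool) (cd : PySem.Dict String Int),
      (has = false → acc = []) →
      pvA_loop cm (rest.map (fun c => (c, d)) ++ acc.map (fun c => (c, d + 1)))
          (if has then PySem.Dict.insert base (d + 1) acc else base) cd
      = (let st := rest.foldl (pvB_node cm (d + 1)) (acc, has, cd);
         pvA_loop cm (st.1.map (fun c => (c, d + 1)))
           (if st.2.1 then PySem.Dict.insert base (d + 1) st.1 else base) st.2.2) := by
  intro rest
  induction rest with
  | nil => intro acc has cd hh; simp
  | cons r rs ih =>
    intro acc has cd hh
    simp only [List.map_cons, List.cons_append, List.foldl_cons]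
    rw [pvA_loop]
    by_cases hk : (PySem.Dict.getD (PySem.Dict.mk cm) r []).isEmpty
    · simp only [hk, if_true]
      have hnode : pvB_node cm (d + 1) (acc, has, cd) r = (acc, has, cd) := by
        unfold pvB_node; simp [hk]
      rw [hnode]
      exact ih acc has cd hh
    · simp only [hk, Bool.false_eq_true, if_false]
      have hdl : (if PySem.Dict.contains
            (if has then PySem.Dict.insert base (d + 1) acc else base) (d + 1) = false
          then PySem.Dict.insert (if has then PySem.Dict.insert base (d + 1) acc else base) (d + 1) []
          else (if has then PySem.Dict.insert base (d + 1) acc else base))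
          = PySem.Dict.insert base (d + 1) acc := by
        cases has with
        | false =>
          rw [hh rfl]
          simp [hb]
        | true =>
          simp [PySem.Dict.contains_insert_self]
      rw [hdl]
      obtain ⟨new, cd', hB, hA⟩ := pvKids_corr (d + 1) base
        (PySem.Dict.getD (PySem.Dict.mk cm) r []) acc true cd []
      have hnode : pvB_node cm (d + 1) (acc, has, cd) r = (acc ++ new, true, cd') := by
        unfold pvB_node
        simp only [hk, Bool.false_eq_true, if_false]
        exact hB
      rw [hA, hnode]
      have hq : (rs.map (fun c => (c, d)) ++ acc.map (fun c => (c, d + 1)))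
            ++ ([] ++ new.map (fun c => (c, d + 1)))
          = rs.map (fun c => (c, d)) ++ (acc ++ new).map (fun c => (c, d + 1)) := by
        simp [List.map_append]
      rw [hq]
      have := ih (acc ++ new) true cd' (by simp)
      simpa using this

lemma pvMain (cm : List (String × List String)) :
    ∀ (n : Nat) (frontier : List String) (base : PySem.Dict Int (List String))
      (cd : PySem.Dict String Int) (d : Int),
      2 * pvUnseen cm cd + frontier.length ≤ n →
      (∀ k : Int, d < k → PySem.Dict.contains base k = false) →
      pvA_loop cm (frontier.map (fun c => (c, d))) base cd = pvB_loop cm frontier base cd d := by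
  intro n
  induction n with
  | zero =>
    intro frontier base cd d hn hb
    have : frontier = [] := by
      cases frontier with
      | nil => rfl
      | cons x xs => simp at hn
    subst this
    rw [pvB_loop]
    simp [pvA_loop]
  | succ n ih =>
    intro frontier base cd d hn hb
    by_cases hf : frontier.isEmpty
    · rw [List.isEmpty_iff] at hf
      subst hf
      rw [pvB_loop]
      simp [pvA_loop]
    · rw [pvB_loop]
      simp only [hf, dif_neg, Bool.false_eq_true, not_false_iff]
      have hin := pvInner cm d base (hb (d + 1) (by omega)) frontier [] false cd (fun _ => rfl)
      simp only [List.map_nil, List.append_nil, if_false, Bool.false_eq_true] at hin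
      rw [hin]
      have hmes := pvB_fold_measure cm (d + 1) frontier [] false cd
      simp only [List.length_nil, Nat.add_zero] at hmes
      have hflen : frontier.length ≠ 0 := by
        simpa [List.isEmpty_iff, List.length_eq_zero_iff] using hf
      refine ih _ _ _ (d + 1) (by omega) ?_
      intro k hk
      by_cases hst : (frontier.foldl (pvB_node cm (d + 1)) ([], false, cd)).2.1
      · simp only [hst, if_true]
        have hkne : (k == (d + 1 : Int)) = false := by
          simp only [beq_eq_false_iff_ne, ne_eq]
          omega
        rw [PySem.Dict.contains_insert, hkne, Bool.false_or]
        exact hb k (by omega)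
      · simp only [hst, Bool.false_eq_true, if_false]
        exact hb k (by omega)

-- ===== VERDICT (by name: the statement is the Claim_ definition above) =====
theorem calculate_depth_levels_spec : Claim_equal_calculate_depth_levels := by
  intro roots cm _
  unfold Spec_calculate_depth_levels calculate_depth_levels calculate_depth_levels_alt
  by_cases h : roots.isEmpty
  · simp [h]
  · simp only [h]
    refine congrArg PySem.Dict.items
      (pvMain cm (2 * pvUnseen cm (roots.foldl (fun d c => PySem.Dict.insert d c 0) PySem.Dict.empty) + roots.length)
        roots _ _ 0 (le_refl _) ?_)
    intro k hk
    have hk0 : (k == (0 : Int)) = false := by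
      simp only [beq_eq_false_iff_ne, ne_eq]
      omega
    simp [PySem.Dict.contains_insert, hk0, PySem.Dict.contains_empty]
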